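-- pv_equiv track=rewrite | github.com/honzastor/hw_mix_quant | src/nsga/nsga_qat.py | transform_to_timeloop_quant_config
-- ===== SOURCE A (Python) =====
-- from collections import OrderedDict
-- from typing import Optional, Dict, List, Any, Generator
--
-- def transform_to_timeloop_quant_config(quant_conf: OrderedDict) -> Dict[int, Dict[str, int]]:
--     """
--     Transforms the quantization configuration for each layer to include the number of output bits.
--
--     Args:
--         quant_conf (OrderedDict): An ordered dictionary with layer numbers as keys and configurations as values.
--
--     Returns:
--         Dict[int, Dict[str, int]]: A transformed configuration dictionary where each layer includes the number of bits for inputs, weights, and outputs.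
--     """
--     transformed_config = {}
--     layers = list(quant_conf.keys())
--
--     for i, layer in enumerate(layers):
--         config = quant_conf[layer]
--         if i < len(layers) - 1:  # If not the last layer
--             next_layer_input = quant_conf[layers[i + 1]]["Inputs"]
--         else:
--             next_layer_input = 8  # Default for the last layer
--
--         transformed_config[layer] = {
--             "Inputs": config["Inputs"],
--             "Weights": config["Weights"],
--             "Outputs": next_layer_input
--         }
--     return transformed_config
-- ===== SOURCE B (Python) =====
-- def transform_to_timeloop_quant_config(quant_conf):
--     """Single reverse pass carrying the next layer's input bits in an accumulator,
--     then restore the original insertion order."""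
--     rev = {}
--     nxt = 8
--     for layer, cfg in reversed(quant_conf.items()):
--         rev[layer] = {"Inputs": cfg["Inputs"], "Weights": cfg["Weights"], "Outputs": nxt}
--         nxt = cfg["Inputs"]
--     return dict(reversed(rev.items()))
-- ===== Notes on version B (the rewrite author's own statement) =====
-- stated objective: alternative
-- what changed: Replaces A's forward index-based loop (enumerate, an i < len-1 branch, layers[i+1] lookahead) by a single reverse traversal that threads the next layer's input bits through an accumulator (seeded with 8), then restores the original order; no index arithmetic or lookahead remains.
import Mathlib
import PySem

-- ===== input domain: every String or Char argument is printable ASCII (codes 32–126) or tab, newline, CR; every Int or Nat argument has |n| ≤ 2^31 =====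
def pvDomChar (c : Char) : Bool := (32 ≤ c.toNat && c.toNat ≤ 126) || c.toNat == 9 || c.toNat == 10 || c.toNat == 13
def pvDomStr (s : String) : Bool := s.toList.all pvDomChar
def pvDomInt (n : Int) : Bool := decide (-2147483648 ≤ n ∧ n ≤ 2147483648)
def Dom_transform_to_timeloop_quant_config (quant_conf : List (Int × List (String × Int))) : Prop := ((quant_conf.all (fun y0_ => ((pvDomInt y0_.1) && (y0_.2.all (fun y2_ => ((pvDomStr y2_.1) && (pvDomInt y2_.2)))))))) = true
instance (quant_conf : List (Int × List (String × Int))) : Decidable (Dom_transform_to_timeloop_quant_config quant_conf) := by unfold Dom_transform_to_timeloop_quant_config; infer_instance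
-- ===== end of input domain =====

-- B replaces A's forward index loop (enumerate, the i < len-1 branch, layers[i+1] lookups) by a
-- single REVERSE pass that carries the next layer's input bits in an accumulator, then restores
-- the original order; alternative decomposition (backward state-threading vs forward lookahead).

-- inner-dict access cfg["Inputs"] / cfg["Weights"]: first-match lookup; default 0 is never used
-- inside Pre_ (Python would raise KeyError there, which Pre_ excludes)
def pvCfgGet (cfg : List (String × Int)) (k : String) : Int :=
  (PySem.Dict.mk cfg).getD k 0

-- ===== PORT A =====
def transform_to_timeloop_quant_config (quant_conf : List (Int × List (String × Int))) : List (Int × List (String × Int)) :=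
  let d := PySem.Dict.ofList quant_conf
  let layers := d.keys
  let tc := (PySem.List.enumerate layers).foldl (fun tc p =>
      let config := d.getD p.2 []
      let next_layer_input : Int :=
        if p.1 < (layers.length : Int) - 1 then
          pvCfgGet (d.getD (PySem.List.pyGetD layers (p.1 + 1) 0) []) "Inputs"
        else 8
      tc.insert p.2 [("Inputs", pvCfgGet config "Inputs"),
                     ("Weights", pvCfgGet config "Weights"),
                     ("Outputs", next_layer_input)])
    PySem.Dict.empty
  tc.items

-- ===== PORT B =====
def transform_to_timeloop_quant_config_alt (quant_conf : List (Int × List (String × Int))) : List (Int × List (String × Int)) :=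
  let items := (PySem.Dict.ofList quant_conf).items
  -- the reversed loop: state = (nxt, rev); rev[layer] = {...}; nxt = cfg["Inputs"]
  let st := items.reverse.foldl
      (fun (st : Int × PySem.Dict Int (List (String × Int))) p =>
        (pvCfgGet p.2 "Inputs",
         st.2.insert p.1 [("Inputs", pvCfgGet p.2 "Inputs"),
                          ("Weights", pvCfgGet p.2 "Weights"),
                          ("Outputs", st.1)]))
      (8, PySem.Dict.empty)
  -- dict(reversed(rev.items()))
  (PySem.Dict.ofList st.2.items.reverse).items

-- ===== PRECONDITION & SPEC =====
-- Pre_ excludes configurations in which some layer's dict lacks an "Inputs" or "Weights" key: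
-- there Python A raises KeyError (it returns nothing), so those inputs are outside the claim.
def Pre_transform_to_timeloop_quant_config (quant_conf : List (Int × List (String × Int))) : Prop :=
  (quant_conf.all (fun p => (p.2.any (fun q => q.1 == "Inputs")) && (p.2.any (fun q => q.1 == "Weights")))) = true
instance (quant_conf : List (Int × List (String × Int))) : Decidable (Pre_transform_to_timeloop_quant_config quant_conf) := by unfold Pre_transform_to_timeloop_quant_config; infer_instance

def pvWitness_transform_to_timeloop_quant_config : (List (Int × List (String × Int))) :=
  [(0, [("Inputs", 8), ("Weights", 4)]), (1, [("Inputs", 6), ("Weights", 2)])]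

def Spec_transform_to_timeloop_quant_config (quant_conf : List (Int × List (String × Int))) (out : List (Int × List (String × Int))) : Prop := out = transform_to_timeloop_quant_config_alt quant_conf
instance (quant_conf : List (Int × List (String × Int))) (out : List (Int × List (String × Int))) : Decidable (Spec_transform_to_timeloop_quant_config quant_conf out) := by unfold Spec_transform_to_timeloop_quant_config; infer_instance

-- ===== CLAIM (what is proved, stated in full; the proofs are below) =====
def Claim_equal_transform_to_timeloop_quant_config : Prop := ∀ (quant_conf : List (Int × List (String × Int))), Dom_transform_to_timeloop_quant_config quant_conf → Pre_transform_to_timeloop_quant_config quant_conf → Spec_transform_to_timeloop_quant_config quant_conf (transform_to_timeloop_quant_config quant_conf)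

-- ===== LEMMAS AND PROOFS =====

-- input bits of the first layer of l, or the default 8
def pvHeadIn (l : List (Int × List (String × Int))) : Int :=
  match l with
  | [] => 8
  | x :: _ => pvCfgGet x.2 "Inputs"

-- the common specification list: each layer paired with the next one's input bits
def pvSpecL (l : List (Int × List (String × Int))) : List (Int × List (String × Int)) :=
  match l with
  | [] => []
  | x :: rest =>
      (x.1, [("Inputs", pvCfgGet x.2 "Inputs"),
             ("Weights", pvCfgGet x.2 "Weights"),
             ("Outputs", pvHeadIn rest)]) :: pvSpecL rest

theorem pvSpecL_length (l : List (Int × List (String × Int))) : (pvSpecL l).length = l.length := by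
  induction l with
  | nil => rfl
  | cons x rest ih => simp [pvSpecL, ih]

theorem pvSpecL_map_fst (l : List (Int × List (String × Int))) :
    (pvSpecL l).map Prod.fst = l.map Prod.fst := by
  induction l with
  | nil => rfl
  | cons x rest ih => simp [pvSpecL, ih]

theorem pvSpecL_getElem (l : List (Int × List (String × Int))) (i : Nat) (h : i < l.length) :
    (pvSpecL l)[i]'(by rw [pvSpecL_length]; exact h)
      = ((l[i]'h).1, [("Inputs", pvCfgGet (l[i]'h).2 "Inputs"),
                      ("Weights", pvCfgGet (l[i]'h).2 "Weights"),
                      ("Outputs", pvHeadIn (l.drop (i + 1)))]) := by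
  induction l generalizing i with
  | nil => simp at h
  | cons x rest ih =>
    cases i with
    | zero => simp [pvSpecL]
    | succ j =>
      have hj : j < rest.length := by simpa using h
      simpa [pvSpecL] using ih j hj

-- the reverse loop of B computes (pvHeadIn l, a dict whose items are (pvSpecL l).reverse)
theorem pvLoop_spec (l : List (Int × List (String × Int))) (hnd : (l.map Prod.fst).Nodup) :
    l.reverse.foldl
      (fun (st : Int × PySem.Dict Int (List (String × Int))) p =>
        (pvCfgGet p.2 "Inputs",
         st.2.insert p.1 [("Inputs", pvCfgGet p.2 "Inputs"),
                          ("Weights", pvCfgGet p.2 "Weights"),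
                          ("Outputs", st.1)]))
      (8, PySem.Dict.empty)
    = (pvHeadIn l,
       PySem.Dict.mk ((pvSpecL l).reverse)) := by
  induction l with
  | nil => rfl
  | cons x rest ih =>
    rw [List.map_cons, List.nodup_cons] at hnd
    have hndr : (rest.map Prod.fst).Nodup := hnd.2
    have hx : x.1 ∉ rest.map Prod.fst := hnd.1
    rw [List.reverse_cons, List.foldl_append, ih hndr]
    simp only [List.foldl_cons, List.foldl_nil]
    have hkeys : (PySem.Dict.mk ((pvSpecL rest).reverse)).keys = ((pvSpecL rest).map Prod.fst).reverse := by
      simp [PySem.Dict.keys]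
    have hcont : (PySem.Dict.mk ((pvSpecL rest).reverse)).contains x.1 = false := by
      rw [PySem.Dict.contains_eq_decide_mem_keys, hkeys, pvSpecL_map_fst]
      simpa using hx
    refine Prod.ext rfl ?_
    apply PySem.Dict.ext
    rw [PySem.Dict.items_insert_of_not_contains _ _ hcont]
    simp [pvSpecL]

theorem b_eq_spec (quant_conf : List (Int × List (String × Int))) :
    transform_to_timeloop_quant_config_alt quant_conf = pvSpecL (PySem.Dict.ofList quant_conf).items := by
  unfold transform_to_timeloop_quant_config_alt
  dsimp only
  set d := PySem.Dict.ofList quant_conf with hd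
  have hnd : (d.items.map Prod.fst).Nodup := PySem.Dict.nodup_keys_ofList quant_conf
  rw [pvLoop_spec d.items hnd]
  simp only [List.reverse_reverse]
  -- Dict.ofList of a list with Nodup keys: items are that list
  have hfresh : (pvSpecL d.items).foldl (fun (e : PySem.Dict Int (List (String × Int))) p => e.insert p.1 p.2) PySem.Dict.empty
      = PySem.Dict.mk (pvSpecL d.items) := by
    apply PySem.Dict.ext
    rw [PySem.Dict.items_foldl_insert_fresh (pvSpecL d.items) Prod.fst Prod.snd PySem.Dict.empty
        (by intro a _; exact PySem.Dict.contains_empty _)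
        (by rw [pvSpecL_map_fst]; exact hnd)]
    simp [show (PySem.Dict.empty : PySem.Dict Int (List (String × Int))).items = [] from rfl]
  calc (PySem.Dict.ofList (pvSpecL d.items)).items
      = ((pvSpecL d.items).foldl (fun (e : PySem.Dict Int (List (String × Int))) p => e.insert p.1 p.2) PySem.Dict.empty).items := rfl
    _ = (pvSpecL d.items) := by rw [hfresh]

theorem a_eq_spec (quant_conf : List (Int × List (String × Int))) :
    transform_to_timeloop_quant_config quant_conf = pvSpecL (PySem.Dict.ofList quant_conf).items := by
  unfold transform_to_timeloop_quant_config
  set d := PySem.Dict.ofList quant_conf with hd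
  have hnd : d.keys.Nodup := PySem.Dict.nodup_keys_ofList quant_conf
  have hkeys : d.keys = d.items.map (·.1) := rfl
  have hkl : d.keys.length = d.items.length := by rw [hkeys]; simp
  have h1 :
      ((PySem.List.enumerate d.keys).foldl (fun tc p =>
        tc.insert p.2 [("Inputs", pvCfgGet (d.getD p.2 []) "Inputs"),
                       ("Weights", pvCfgGet (d.getD p.2 []) "Weights"),
                       ("Outputs", if p.1 < (d.keys.length : Int) - 1 then
                           pvCfgGet (d.getD (PySem.List.pyGetD d.keys (p.1 + 1) 0) []) "Inputs"
                         else 8)])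
        PySem.Dict.empty).items
      = (PySem.List.enumerate d.keys).map (fun p =>
          (p.2, [("Inputs", pvCfgGet (d.getD p.2 []) "Inputs"),
                 ("Weights", pvCfgGet (d.getD p.2 []) "Weights"),
                 ("Outputs", if p.1 < (d.keys.length : Int) - 1 then
                     pvCfgGet (d.getD (PySem.List.pyGetD d.keys (p.1 + 1) 0) []) "Inputs"
                   else 8)])) := by
    have := PySem.Dict.items_foldl_insert_fresh (PySem.List.enumerate d.keys)
      (fun p => p.2)
      (fun p => [("Inputs", pvCfgGet (d.getD p.2 []) "Inputs"),
                 ("Weights", pvCfgGet (d.getD p.2 []) "Weights"),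
                 ("Outputs", if p.1 < (d.keys.length : Int) - 1 then
                     pvCfgGet (d.getD (PySem.List.pyGetD d.keys (p.1 + 1) 0) []) "Inputs"
                   else 8)])
      PySem.Dict.empty
      (by intro a _; exact PySem.Dict.contains_empty _)
      (by rw [PySem.List.map_snd_enumerate]; exact hnd)
    simp at this
    exact this
  show _ = _
  rw [h1]
  apply List.ext_getElem
  · simp [PySem.List.length_enumerate, hkl, pvSpecL_length]
  · intro i h₁ h₂
    have hi : i < d.items.length := by
      rw [← hkl]
      simpa [PySem.List.length_enumerate] using h₁
    rw [List.getElem_map, PySem.List.getElem_enumerate, pvSpecL_getElem d.items i hi]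
    have hkey : d.keys[i]'(by rw [hkl]; exact hi) = (d.items[i]'hi).1 := by
      simp [hkeys]
    have hcfg : d.getD (d.items[i]'hi).1 [] = (d.items[i]'hi).2 :=
      PySem.Dict.getD_of_mem_items d (by simp) hnd []
    refine Prod.ext ?_ ?_
    · simpa using hkey
    · simp only [hkey, hcfg, List.cons.injEq, Prod.mk.injEq, true_and, and_true]
      by_cases hlast : i + 1 < d.items.length
      · have hcond : ((0 : Int) + (i : Int)) < ((d.keys.length : Nat) : Int) - 1 := by
          rw [hkl]; omega
        rw [if_pos hcond]
        have hidx : PySem.List.pyGetD d.keys ((0 : Int) + (i : Int) + 1) 0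
            = d.keys[i+1]'(by rw [hkl]; exact hlast) := by
          have : (0 : Int) + (i : Int) + 1 = ((i + 1 : Nat) : Int) := by push_cast; ring
          rw [this, PySem.List.pyGetD_natCast]
          exact List.getD_eq_getElem _ _ (by rw [hkl]; exact hlast)
        have hkey' : d.keys[i+1]'(by rw [hkl]; exact hlast) = (d.items[i+1]'hlast).1 := by
          simp [hkeys]
        have hcfg' : d.getD (d.items[i+1]'hlast).1 [] = (d.items[i+1]'hlast).2 :=
          PySem.Dict.getD_of_mem_items d (by simp) hnd []
        rw [hidx, hkey', hcfg']
        rw [List.drop_eq_getElem_cons hlast]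
        rfl
      · have hcond : ¬ ((0 : Int) + (i : Int)) < ((d.keys.length : Nat) : Int) - 1 := by
          rw [hkl]; omega
        rw [if_neg hcond]
        have : d.items.drop (i + 1) = [] := List.drop_eq_nil_of_le (by omega)
        rw [this]
        rfl

-- ===== VERDICT (by name: the statement is the Claim_ definition above) =====
theorem transform_to_timeloop_quant_config_spec : Claim_equal_transform_to_timeloop_quant_config := by
  intro quant_conf _ _
  unfold Spec_transform_to_timeloop_quant_config
  rw [a_eq_spec, b_eq_spec]
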